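-- pv_equiv track=rewrite | github.com/lukewnag/high-school | Railroad-Route-Finder/RailroadRouteFinder_using_heaps.py | heapRemove
-- ===== SOURCE A (Python) =====
-- def heapRemove(lst):
--     idx = len(lst)-1
--     lst[0] = lst[idx]
--     lst.pop(idx)
--     idx = 0
--     while idx<(len(lst)-1)//2:
--         newidx = 2*idx+2
--         if lst[2*idx+1]<lst[newidx]: newidx = 2*idx+1
--         if lst[newidx]>lst[idx]: break
--         lst[idx], lst[newidx] = lst[newidx], lst[idx]
--         idx = newidx
--     return lst
-- ===== SOURCE B (Python) =====
-- def heapRemove(lst):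
--     lst[0] = lst[-1]
--     lst.pop()
--     _siftDown(lst, 0)
--     return lst
--
-- def _siftDown(lst, idx):
--     if idx >= (len(lst) - 1) // 2:
--         return
--     newidx = 2*idx+1 if lst[2*idx+1] < lst[2*idx+2] else 2*idx+2
--     if lst[newidx] > lst[idx]:
--         return
--     lst[idx], lst[newidx] = lst[newidx], lst[idx]
--     _siftDown(lst, newidx)
-- ===== Notes on version B (the rewrite author's own statement) =====
-- stated objective: alternative
-- what changed: The while-loop sift-down is replaced by a recursive helper _siftDown that expresses one sift step per call and recurses on the chosen child, instead of mutating loop state in place.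
import Mathlib
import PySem

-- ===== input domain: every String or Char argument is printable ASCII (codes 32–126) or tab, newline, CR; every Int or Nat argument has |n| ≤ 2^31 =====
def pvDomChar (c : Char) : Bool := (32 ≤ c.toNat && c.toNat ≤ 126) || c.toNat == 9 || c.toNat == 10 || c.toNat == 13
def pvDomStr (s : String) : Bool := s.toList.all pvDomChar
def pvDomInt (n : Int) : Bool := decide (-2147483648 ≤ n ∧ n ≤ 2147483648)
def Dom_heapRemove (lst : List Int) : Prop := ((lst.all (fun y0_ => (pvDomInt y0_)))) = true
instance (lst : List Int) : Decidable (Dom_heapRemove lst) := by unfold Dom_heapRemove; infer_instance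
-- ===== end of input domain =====

-- B rewrites A's while-loop sift-down as a recursive helper (same values, mutation-free phrasing);
-- both Pythons mutate lst in place and return it, and the equivalence proved here is about the return value.

-- ===== PORT A =====
-- A's while loop, with the loop state (lst, idx) threaded explicitly and a fuel
-- bound (the loop strictly increases idx below lst.length, so lst.length steps suffice).
def heapRemoveLoop (lst : List Int) (idx : Nat) (fuel : Nat) : List Int :=
  match fuel with
  | 0 => lst
  | fuel + 1 =>
    if (idx : Int) < PySem.Int.floordiv ((lst.length : Int) - 1) 2 then
      -- inside the loop all three indices are in range, so getD is exact
      let newidx0 := 2 * idx + 2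
      let newidx := if lst.getD (2 * idx + 1) 0 < lst.getD newidx0 0 then 2 * idx + 1 else newidx0
      if lst.getD newidx 0 > lst.getD idx 0 then lst
      else heapRemoveLoop ((lst.set idx (lst.getD newidx 0)).set newidx (lst.getD idx 0)) newidx fuel
    else lst

def heapRemove (lst : List Int) : List Int :=
  let idx := lst.length - 1
  let lst1 := lst.set 0 (lst.getD idx 0)   -- lst[0] = lst[idx]  (Pre_ gives lst ≠ [], so idx is in range)
  let lst2 := lst1.dropLast                -- lst.pop(idx): idx = len-1 removes the last element
  heapRemoveLoop lst2 0 lst2.length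

-- ===== PORT B =====
-- recursive _siftDown, terminating because the chosen child index strictly exceeds idx and stays below length
def siftDownAlt (lst : List Int) (idx : Nat) : List Int :=
  if h : PySem.Int.floordiv ((lst.length : Int) - 1) 2 ≤ (idx : Int) then lst
  else
    let newidx := if lst.getD (2 * idx + 1) 0 < lst.getD (2 * idx + 2) 0 then 2 * idx + 1 else 2 * idx + 2
    if lst.getD newidx 0 > lst.getD idx 0 then lst
    else siftDownAlt ((lst.set idx (lst.getD newidx 0)).set newidx (lst.getD idx 0)) newidx
termination_by lst.length - idx
decreasing_by
  simp only [List.length_set]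
  have hb : PySem.Int.floordiv ((lst.length : Int) - 1) 2 ≤ (lst.length : Int) - 1 := by
    rw [PySem.Int.floordiv_eq_ediv_of_pos (by omega)]; omega
  split <;> omega

def heapRemove_alt (lst : List Int) : List Int :=
  match PySem.List.pyGet? lst (-1) with   -- lst[-1]; none = IndexError (excluded by Pre_)
  | none => []
  | some last => siftDownAlt ((lst.set 0 last).dropLast) 0

-- ===== PRECONDITION & SPEC =====
-- Pre_ excludes only the empty list, on which both Pythons raise IndexError (lst[-1] / lst[idx]).
def Pre_heapRemove (lst : List Int) : Prop := lst ≠ []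
instance (lst : List Int) : Decidable (Pre_heapRemove lst) := by unfold Pre_heapRemove; infer_instance
def pvWitness_heapRemove : List Int := [1, 5, 3, 7, 6, 4]
def Spec_heapRemove (lst : List Int) (out : List Int) : Prop := out = heapRemove_alt lst
instance (lst : List Int) (out : List Int) : Decidable (Spec_heapRemove lst out) := by unfold Spec_heapRemove; infer_instance

-- ===== CLAIM (what is proved, stated in full; the proofs are below) =====
def Claim_equal_heapRemove : Prop := ∀ (lst : List Int), Dom_heapRemove lst → Pre_heapRemove lst → Spec_heapRemove lst (heapRemove lst)

-- ===== LEMMAS AND PROOFS =====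

-- enough fuel makes A's loop equal B's recursion
theorem loop_eq_siftDown (fuel : Nat) : ∀ (lst : List Int) (idx : Nat),
    lst.length ≤ idx + fuel → heapRemoveLoop lst idx fuel = siftDownAlt lst idx := by
  induction fuel with
  | zero =>
    intro lst idx h
    have hge : PySem.Int.floordiv ((lst.length : Int) - 1) 2 ≤ (idx : Int) := by
      rw [PySem.Int.floordiv_eq_ediv_of_pos (by omega)]; omega
    rw [siftDownAlt, dif_pos hge]; rfl
  | succ fuel ih =>
    intro lst idx h
    rw [heapRemoveLoop, siftDownAlt]
    by_cases hc : (idx : Int) < PySem.Int.floordiv ((lst.length : Int) - 1) 2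
    · rw [if_pos hc, dif_neg (by omega)]
      have hlen : 2 * idx + 2 < lst.length := by
        have h2 := hc
        rw [PySem.Int.floordiv_eq_ediv_of_pos (by omega)] at h2
        omega
      simp only []
      split <;> split <;> first
        | rfl
        | exact ih _ _ (by simp only [List.length_set]; omega)
    · rw [if_neg hc, dif_pos (by omega)]

-- ===== VERDICT (by name: the statement is the Claim_ definition above) =====
theorem heapRemove_spec : Claim_equal_heapRemove := by
  intro lst _ hpre
  unfold Spec_heapRemove
  match lst, hpre with
  | x :: xs, _ =>
    have hg : (x :: xs).getD ((x :: xs).length - 1) 0 = (x :: xs).getLast (by simp) := by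
      rw [List.getD_eq_getElem _ _ (by simp)]
      simp [List.getLast_eq_getElem]
    show heapRemoveLoop (((x :: xs).set 0 ((x :: xs).getD ((x :: xs).length - 1) 0)).dropLast) 0
        (((x :: xs).set 0 ((x :: xs).getD ((x :: xs).length - 1) 0)).dropLast).length
        = heapRemove_alt (x :: xs)
    rw [heapRemove_alt, PySem.List.pyGet?_neg_one,
        List.getLast?_eq_some_getLast (by simp : (x :: xs) ≠ []), hg]
    exact loop_eq_siftDown _ _ _ (by omega)
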